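-- pv_equiv track=rewrite | github.com/Guiswer/Laboratorio_Divisibilidade | main.py | divisibilidade3
-- ===== SOURCE A (Python) =====
-- def divisibilidade3(num):
--     verificador = False
--     a = list(str(num))
--     b = 0
--
--     if len(a) > 1: #para números com mais de 1 algorismos
--         while len(a) > 1:
--             for i in a:
--                 b += int(i)
--             a = str(b)
--             b = 0
--         if a == "3" or a == "6" or a == "9":
--             verificador = True
--     else: #para números com 1 algorismos
--         while num > 0:
--             num -= 3
--         if num == 0:
--             verificador = True
--
--     return verificador
-- ===== SOURCE B (Python) =====
-- def divisibilidade3(num):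
--     s = sum(int(c) for c in str(num))
--     return s % 3 == 0
-- ===== Notes on version B (the rewrite author's own statement) =====
-- stated objective: simpler
-- what changed: Replaces the repeated digital-root loop plus the separate subtract-3 branch for single digits with one digit-sum pass over str(num) followed by a mod-3 test (valid since 10 = 1 mod 3); the string/int(c) extraction is kept so negatives and non-integers raise ValueError exactly as A does.
import Mathlib
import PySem

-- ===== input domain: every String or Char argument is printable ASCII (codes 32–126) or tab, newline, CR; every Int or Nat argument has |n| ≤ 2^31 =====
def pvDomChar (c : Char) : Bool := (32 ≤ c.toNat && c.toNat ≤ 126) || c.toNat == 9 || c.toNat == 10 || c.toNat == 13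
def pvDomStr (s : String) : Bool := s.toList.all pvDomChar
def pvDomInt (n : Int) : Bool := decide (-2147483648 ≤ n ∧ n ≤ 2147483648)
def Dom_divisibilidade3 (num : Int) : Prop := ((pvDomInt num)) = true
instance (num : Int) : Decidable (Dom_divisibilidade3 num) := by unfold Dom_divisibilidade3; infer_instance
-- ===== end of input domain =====

-- B replaces A's repeated digital-root loop + subtract-3 branch with one digit-sum pass and a mod-3 test (simpler).

-- ===== PORT A =====
-- int(i) for a one-character string i (ValueError → none; Pre_ keeps all chars digits)
def pvVal (c : Char) : Int := (PySem.Int.ofChars? [c]).getD 0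

-- 'for i in a: b += int(i)' starting from b = 0
def pvDigitSum (a : List Char) : Int := a.foldl (fun b c => b + pvVal c) 0

-- 'while len(a) > 1: b = digit sum of a; a = str(b); b = 0'  (fuel is only a totality guard)
def pvLoop : Nat → List Char → List Char
  | 0, a => a
  | f+1, a => if 1 < a.length then pvLoop f (PySem.Int.toChars (pvDigitSum a)) else a

-- 'while num > 0: num -= 3'
def pvSub3 (num : Int) : Int :=
  if 0 < num then pvSub3 (num - 3) else num
termination_by num.toNat
decreasing_by omega

def divisibilidade3 (num : Int) : Bool :=
  let a := PySem.Int.toChars num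
  if 1 < a.length then
    let a' := pvLoop (num.natAbs + 1) a
    a' == ['3'] || a' == ['6'] || a' == ['9']
  else
    pvSub3 num == 0

-- ===== PORT B =====
def divisibilidade3_alt (num : Int) : Bool :=
  let s := ((PySem.Int.toChars num).map (fun c => (PySem.Int.ofChars? [c]).getD 0)).sum
  PySem.Int.mod s 3 == 0

-- ===== PRECONDITION & SPEC =====
-- A raises ValueError on negative num (int('-') on the sign character); B raises identically there.
def Pre_divisibilidade3 (num : Int) : Prop := 0 ≤ num
instance (num : Int) : Decidable (Pre_divisibilidade3 num) := by unfold Pre_divisibilidade3; infer_instance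
def pvWitness_divisibilidade3 : Int := (12)

def Spec_divisibilidade3 (num : Int) (out : Bool) : Prop := out = divisibilidade3_alt num
instance (num : Int) (out : Bool) : Decidable (Spec_divisibilidade3 num out) := by unfold Spec_divisibilidade3; infer_instance

-- ===== CLAIM (what is proved, stated in full; the proofs are below) =====
def Claim_equal_divisibilidade3 : Prop := ∀ (num : Int), Dom_divisibilidade3 num → Pre_divisibilidade3 num → Spec_divisibilidade3 num (divisibilidade3 num)

-- ===== LEMMAS AND PROOFS =====

-- mathematical digit sum of a natural number
def dsum (n : Nat) : Nat :=
  if n < 10 then n else n % 10 + dsum (n / 10)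
termination_by n
decreasing_by omega

theorem dsum_mod3 (n : Nat) : dsum n % 3 = n % 3 := by
  induction n using Nat.strong_induction_on with
  | _ n ih =>
    rw [dsum]
    split
    · rfl
    · have := ih (n / 10) (by omega)
      omega

theorem dsum_le (n : Nat) : dsum n ≤ n := by
  induction n using Nat.strong_induction_on with
  | _ n ih =>
    rw [dsum]
    split
    · exact le_rfl
    · have := ih (n / 10) (by omega)
      omega

theorem dsum_pos (n : Nat) (h : 1 ≤ n) : 1 ≤ dsum n := by
  induction n using Nat.strong_induction_on with
  | _ n ih =>
    rw [dsum]
    split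
    · omega
    · rename_i h10
      by_cases hr : 1 ≤ n % 10
      · omega
      · have := ih (n / 10) (by omega) (by omega)
        omega

theorem dsum_lt (n : Nat) (h : 10 ≤ n) : dsum n < n := by
  rw [dsum]
  split
  · omega
  · have := dsum_le (n / 10)
    omega

theorem pvVal_digitChar (d : Nat) (h : d < 10) : pvVal (Nat.digitChar d) = (d : Int) := by
  interval_cases d <;> decide

theorem sumVal_toDigitsCore :
    ∀ (f n : Nat) (acc : List Char), n < f →
      ((Nat.toDigitsCore 10 f n acc).map pvVal).sum = (dsum n : Int) + (acc.map pvVal).sum := by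
  intro f
  induction f with
  | zero => intro n acc h; omega
  | succ f ih =>
    intro n acc h
    rw [Nat.toDigitsCore]
    by_cases h0 : n / 10 = 0
    · have hn : n < 10 := by omega
      simp only [h0, if_pos]
      rw [List.map_cons, List.sum_cons, pvVal_digitChar _ (by omega), dsum, if_pos hn]
      have : n % 10 = n := by omega
      rw [this]
    · simp only [h0, ite_false]
      rw [ih (n / 10) _ (by omega)]
      rw [List.map_cons, List.sum_cons, pvVal_digitChar _ (by omega)]
      conv_rhs => rw [dsum, if_neg (by omega)]
      push_cast
      ring

theorem len_toDigitsCore :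
    ∀ (f n : Nat) (acc : List Char), n < f →
      acc.length < (Nat.toDigitsCore 10 f n acc).length := by
  intro f
  induction f with
  | zero => intro n acc h; omega
  | succ f ih =>
    intro n acc h
    rw [Nat.toDigitsCore]
    by_cases h0 : n / 10 = 0
    · simp [h0]
    · simp only [h0, ite_false]
      have := ih (n / 10) ((n % 10).digitChar :: acc) (by omega)
      simp at this ⊢
      omega

theorem toChars_natCast (m : Nat) : PySem.Int.toChars (m : Int) = Nat.toDigits 10 m := by
  simp [PySem.Int.toChars]

theorem sumVal_toChars (m : Nat) :
    ((PySem.Int.toChars (m : Int)).map pvVal).sum = (dsum m : Int) := by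
  rw [toChars_natCast, Nat.toDigits]
  have := sumVal_toDigitsCore (m + 1) m [] (by omega)
  simpa using this

theorem toChars_len_gt (m : Nat) (h : 10 ≤ m) : 1 < (PySem.Int.toChars (m : Int)).length := by
  rw [toChars_natCast, Nat.toDigits, Nat.toDigitsCore]
  have h0 : ¬ (m / 10 = 0) := by omega
  simp only [if_neg h0]
  have := len_toDigitsCore m (m / 10) [(m % 10).digitChar] (by omega)
  simpa using this

theorem toChars_len_lt10 (m : Nat) (h : m < 10) : (PySem.Int.toChars (m : Int)).length = 1 := by
  interval_cases m <;> decide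

theorem pvDigitSum_eq (a : List Char) : pvDigitSum a = (a.map pvVal).sum := by
  have key : ∀ (cs : List Char) (b : Int), cs.foldl (fun b c => b + pvVal c) b = b + (cs.map pvVal).sum := by
    intro cs
    induction cs with
    | nil => intro b; simp
    | cons c cs ih => intro b; simp [List.foldl, ih]; ring
  simpa using key a 0

theorem loop_spec :
    ∀ (m fuel : Nat), 1 ≤ m → m ≤ fuel →
      ∃ r : Nat, 1 ≤ r ∧ r < 10 ∧ r % 3 = m % 3 ∧
        pvLoop fuel (PySem.Int.toChars (m : Int)) = PySem.Int.toChars (r : Int) := by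
  intro m
  induction m using Nat.strong_induction_on with
  | _ m ih =>
    intro fuel h1 hf
    obtain ⟨f, rfl⟩ : ∃ f, fuel = f + 1 := ⟨fuel - 1, by omega⟩
    by_cases h10 : m < 10
    · refine ⟨m, h1, h10, rfl, ?_⟩
      rw [pvLoop]
      rw [if_neg (by rw [toChars_len_lt10 m h10]; omega)]
    · rw [pvLoop, if_pos (toChars_len_gt m (by omega))]
      rw [pvDigitSum_eq, sumVal_toChars]
      obtain ⟨r, hr1, hr2, hr3, hr4⟩ :=
        ih (dsum m) (dsum_lt m (by omega)) f (dsum_pos m h1) (by have := dsum_lt m (by omega); omega)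
      exact ⟨r, hr1, hr2, by rw [hr3, dsum_mod3], hr4⟩

theorem pvSub3_pos (n : Int) (h : 0 < n) : pvSub3 n = pvSub3 (n - 3) := by
  rw [pvSub3, if_pos h]

theorem pvSub3_nonpos (n : Int) (h : ¬ 0 < n) : pvSub3 n = n := by
  rw [pvSub3, if_neg h]

theorem sub3_beq (m : Nat) (h : m < 10) : (pvSub3 (m : Int) == 0) = (m % 3 == 0) := by
  interval_cases m <;> norm_num [pvSub3_pos, pvSub3_nonpos]

-- ===== VERDICT (by name: the statement is the Claim_ definition above) =====
theorem divisibilidade3_spec : Claim_equal_divisibilidade3 := by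
  intro num hdom hpre
  unfold Spec_divisibilidade3
  obtain ⟨m, rfl⟩ : ∃ m : Nat, num = (m : Int) :=
    ⟨num.toNat, (Int.toNat_of_nonneg hpre).symm⟩
  have hB : divisibilidade3_alt (m : Int) = ((dsum m % 3 : Nat) == 0) := by
    show (PySem.Int.mod (((PySem.Int.toChars (m : Int)).map fun c => (PySem.Int.ofChars? [c]).getD 0).sum) 3 == 0) = _
    have hmap : ((PySem.Int.toChars (m : Int)).map fun c => (PySem.Int.ofChars? [c]).getD 0) = (PySem.Int.toChars (m : Int)).map pvVal := rfl
    rw [hmap, sumVal_toChars]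
    have hm : PySem.Int.mod (dsum m : Int) 3 = ((dsum m % 3 : Nat) : Int) := by
      show Int.fmod _ _ = _
      rw [Int.fmod_eq_emod]
      simp only [show ((0:Int) ≤ 3 ∨ (3:Int) ∣ (dsum m : Int)) from Or.inl (by norm_num), if_pos, add_zero]
      omega
    rw [hm]
    have hiff : ((dsum m % 3 : Nat) : Int) = 0 ↔ (dsum m % 3 : Nat) = 0 := by omega
    by_cases hc : (dsum m % 3 : Nat) = 0
    · simp [hc]
    · simp [hc]
      omega
  rw [hB]
  by_cases h10 : m < 10
  · unfold divisibilidade3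
    rw [if_neg (by rw [toChars_len_lt10 m h10]; omega)]
    rw [sub3_beq m h10]
    have hds : dsum m = m := by rw [dsum, if_pos h10]
    rw [hds]
  · unfold divisibilidade3
    rw [if_pos (toChars_len_gt m (by omega))]
    have hna : ((m : Int).natAbs + 1) = m + 1 := by simp
    rw [hna]
    obtain ⟨r, hr1, hr2, hr3, hr4⟩ := loop_spec m (m + 1) (by omega) (by omega)
    rw [hr4]
    have hd : dsum m % 3 = r % 3 := by rw [dsum_mod3, ← hr3]
    interval_cases r <;> rw [hd] <;> decide
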